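-- pv_equiv track=rewrite | github.com/GhostQS/alphalend-supply | bucket_tbtc.py | _parse_parent_ids
-- ===== SOURCE A (Python) =====
-- from typing import Any, Dict, List, Optional
--
-- def _parse_parent_ids(arg_vals: Optional[List[str]]) -> List[str]:
--     out: List[str] = []
--     if not arg_vals:
--         return out
--     for val in arg_vals:
--         if "," in val:
--             out.extend([s.strip() for s in val.split(",") if s.strip()])
--         else:
--             v = val.strip()
--             if v:
--                 out.append(v)
--     # unique preserve order
--     seen = set()
--     uniq: List[str] = []
--     for v in out:
--         if v not in seen:
--             seen.add(v)
--             uniq.append(v)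
--     return uniq
-- ===== SOURCE B (Python) =====
-- from typing import Any, Dict, List, Optional
--
-- def _parse_parent_ids(arg_vals: Optional[List[str]]) -> List[str]:
--     if not arg_vals:
--         return []
--     # one flat comprehension: split always (split handles the comma-free case), strip, drop empties
--     pieces = [s for v in arg_vals for s in (p.strip() for p in v.split(",")) if s]
--     # dedup without a seen-set: repeatedly take the head and filter it out of the rest
--     out: List[str] = []
--     while pieces:
--         head = pieces[0]
--         out.append(head)
--         pieces = [p for p in pieces[1:] if p != head]
--     return out
-- ===== Notes on version B (the rewrite author's own statement) =====
-- stated objective: alternative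
-- what changed: B flattens the input with one comprehension (no ',' branch) and dedups without any set, by a worklist loop that repeatedly takes the head and filters all its later duplicates out of the rest (nub-by-removal), instead of A's branching build pass followed by a seen-set dedup pass.
import Mathlib
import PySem

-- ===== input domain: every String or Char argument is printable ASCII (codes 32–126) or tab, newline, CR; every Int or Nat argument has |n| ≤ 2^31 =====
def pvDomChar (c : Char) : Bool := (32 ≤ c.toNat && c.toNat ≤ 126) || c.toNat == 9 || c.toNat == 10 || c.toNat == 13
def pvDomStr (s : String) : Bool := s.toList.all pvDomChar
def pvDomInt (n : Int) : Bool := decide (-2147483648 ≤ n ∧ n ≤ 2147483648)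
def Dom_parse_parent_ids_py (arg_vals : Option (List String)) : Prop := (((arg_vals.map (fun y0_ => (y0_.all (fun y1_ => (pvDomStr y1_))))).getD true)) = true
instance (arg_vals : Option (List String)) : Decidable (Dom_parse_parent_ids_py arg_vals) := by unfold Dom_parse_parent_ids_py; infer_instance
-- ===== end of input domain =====

-- B replaces A's branching build pass + seen-set dedup pass by one flat comprehension and a
-- set-free worklist dedup that repeatedly filters the head out of the rest (alternative; same return value).

-- val.split(",") — the separator is the non-empty literal ",", so Python never raises (split? is always some)
def pvSplitComma (s : String) : List String := (PySem.Str.split? s ",").getD []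

-- ===== PORT A =====
def parse_parent_ids_py (arg_vals : Option (List String)) : List String :=
  match arg_vals with
  | none => []
  | some vals =>
    if vals = [] then []
    else
      -- first loop: build `out`
      let out : List String := vals.foldl (fun out val =>
        if PySem.Str.isIn "," val then
          out ++ ((pvSplitComma val).filter (fun s => PySem.Str.strip s ≠ "")).map PySem.Str.strip
        else
          let v := PySem.Str.strip val
          if v ≠ "" then out ++ [v] else out) []
      -- second loop: unique preserve order
      let fin := out.foldl (fun (st : PySem.Set String × List String) v =>
        if PySem.Set.contains st.1 v then st else (PySem.Set.add st.1 v, st.2 ++ [v]))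
        (PySem.Set.empty, [])
      fin.2

-- ===== PORT B =====
-- the while loop of Source B: state is (out, pieces); pieces strictly shrinks
def pvNubGo (out : List String) (pieces : List String) : List String :=
  match pieces with
  | [] => out
  | head :: rest => pvNubGo (out ++ [head]) (rest.filter (fun p => p ≠ head))
termination_by pieces.length
decreasing_by
  simp only [List.length_unattach]
  exact Nat.lt_succ_of_le (le_trans (List.length_filter_le _ _) (by simp))

def parse_parent_ids_py_alt (arg_vals : Option (List String)) : List String :=
  match arg_vals with
  | none => []
  | some vals =>
    if vals = [] then []
    else
      let pieces : List String :=
        vals.flatMap (fun v => ((pvSplitComma v).map PySem.Str.strip).filter (fun s => s ≠ ""))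
      pvNubGo [] pieces

-- ===== PRECONDITION & SPEC =====
def Spec_parse_parent_ids_py (arg_vals : Option (List String)) (out : List String) : Prop := out = parse_parent_ids_py_alt arg_vals
instance (arg_vals : Option (List String)) (out : List String) : Decidable (Spec_parse_parent_ids_py arg_vals out) := by unfold Spec_parse_parent_ids_py; infer_instance

-- ===== CLAIM (what is proved, stated in full; the proofs are below) =====
def Claim_equal_parse_parent_ids_py : Prop := ∀ (arg_vals : Option (List String)), Dom_parse_parent_ids_py arg_vals → Spec_parse_parent_ids_py arg_vals (parse_parent_ids_py arg_vals)

-- ===== LEMMAS AND PROOFS =====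

-- A's dedup step
def pvStep (st : PySem.Set String × List String) (v : String) : PySem.Set String × List String :=
  if PySem.Set.contains st.1 v then st else (PySem.Set.add st.1 v, st.2 ++ [v])

-- the non-empty stripped pieces a single input string contributes (A's comma branch)
def pvPieces (val : String) : List String :=
  ((pvSplitComma val).filter (fun s => PySem.Str.strip s ≠ "")).map PySem.Str.strip

theorem pv_go_single (sep : List Char) :
    ∀ (fuel : Nat) (l cur : List Char) (acc : List (List Char)), ¬ sep <:+: l →
      PySem.Chars.splitOn.go sep fuel l cur acc = acc.reverse ++ [cur.reverse ++ l] := by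
  intro fuel
  induction fuel with
  | zero => intro l cur acc _; simp [PySem.Chars.splitOn.go]
  | succ n ih =>
    intro l cur acc h
    cases l with
    | nil => simp [PySem.Chars.splitOn.go]
    | cons c rest =>
      have hpre : sep.isPrefixOf (c :: rest) = false := by
        rw [Bool.eq_false_iff]
        intro hp
        exact h ((List.isPrefixOf_iff_prefix.mp hp).isInfix)
      rw [PySem.Chars.splitOn.go, hpre]
      simp only [Bool.false_eq_true, if_false]
      rw [ih rest (c :: cur) acc (fun hi => h (hi.trans (List.suffix_cons c rest).isInfix))]
      simp

theorem pv_splitComma_single (val : String) (h : PySem.Str.isIn "," val = false) :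
    pvSplitComma val = [val] := by
  have h' : ¬ (",".toList <:+: val.toList) := by
    rw [PySem.Str.isIn_eq] at h
    exact (PySem.Chars.isIn_eq_false_iff _ _).mp h
  unfold pvSplitComma
  simp only [PySem.Str.split?, PySem.Chars.split?]
  rw [if_neg (by decide)]
  rw [show PySem.Chars.splitOn val.toList ",".toList
        = PySem.Chars.splitOn.go ",".toList (val.toList.length + 1) val.toList [] [] from rfl]
  rw [pv_go_single ",".toList _ _ _ _ h']
  simp [String.ofList_toList]

-- A's first loop builds exactly the concatenation of the pvPieces of each input string
theorem pv_out_flatMap (vals : List String) (init : List String) :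
    vals.foldl (fun out val =>
        if PySem.Str.isIn "," val then
          out ++ ((pvSplitComma val).filter (fun s => PySem.Str.strip s ≠ "")).map PySem.Str.strip
        else
          if PySem.Str.strip val ≠ "" then out ++ [PySem.Str.strip val] else out) init
      = init ++ vals.flatMap pvPieces := by
  induction vals generalizing init with
  | nil => simp
  | cons x xs ih =>
    rw [List.foldl_cons, ih, List.flatMap_cons, ← List.append_assoc]
    have hb : (if PySem.Str.isIn "," x then
          init ++ ((pvSplitComma x).filter (fun s => PySem.Str.strip s ≠ "")).map PySem.Str.strip
        else
          if PySem.Str.strip x ≠ "" then init ++ [PySem.Str.strip x] else init)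
        = init ++ pvPieces x := by
      by_cases hin : PySem.Str.isIn "," x = true
      · rw [if_pos hin]; rfl
      · rw [if_neg hin]
        have hx : pvPieces x = if PySem.Str.strip x ≠ "" then [PySem.Str.strip x] else [] := by
          unfold pvPieces
          rw [pv_splitComma_single x (Bool.eq_false_iff.mpr hin)]
          by_cases h : PySem.Str.strip x = "" <;> simp [List.filter, h]
        rw [hx]
        by_cases h : PySem.Str.strip x = "" <;> simp [h]
    rw [hb]

-- B's pieces per value equal A's pvPieces (filter-then-map vs map-then-filter)
theorem pv_pieces_eq (v : String) :
    ((pvSplitComma v).map PySem.Str.strip).filter (fun s => s ≠ "") = pvPieces v := by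
  unfold pvPieces
  induction pvSplitComma v with
  | nil => rfl
  | cons x xs ih =>
    simp only [List.map_cons, List.filter_cons]
    by_cases h : PySem.Str.strip x = "" <;> simpa [h] using ih

-- the key lemma: A's seen-set dedup fold equals B's nub-by-removal worklist
theorem pv_fold_eq_nubGo (xs : List String) :
    ∀ (S : PySem.Set String) (acc : List String),
      (xs.foldl pvStep (S, acc)).2
        = pvNubGo acc (xs.filter (fun x => !(PySem.Set.contains S x))) := by
  induction xs with
  | nil => intro S acc; simp [pvNubGo]
  | cons x t ih =>
    intro S acc
    rw [List.foldl_cons, List.filter_cons]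
    by_cases hc : x ∈ S
    · have hstep : pvStep (S, acc) x = (S, acc) := by simp [pvStep, hc]
      rw [hstep, if_neg (by simp [hc]), ih]
    · have hstep : pvStep (S, acc) x = (PySem.Set.add S x, acc ++ [x]) := by
        simp [pvStep, hc]
      rw [hstep, if_pos (by simp [hc]), ih, pvNubGo]
      congr 1
      rw [List.filter_filter]
      apply List.filter_congr
      intro p _
      have hm : (p ∈ PySem.Set.add S x) ↔ (p ∈ S ∨ p = x) := PySem.Set.mem_add S x p
      by_cases hp : p = x
      · simp [hp]
      · by_cases hs : p ∈ S <;>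
          simp [hm, hp, hs]

-- ===== VERDICT (by name: the statement is the Claim_ definition above) =====
theorem parse_parent_ids_py_spec : Claim_equal_parse_parent_ids_py := by
  intro arg_vals _
  unfold Spec_parse_parent_ids_py parse_parent_ids_py parse_parent_ids_py_alt
  cases arg_vals with
  | none => rfl
  | some vals =>
    by_cases hv : vals = []
    · simp [hv]
    · simp only [hv, if_false]
      rw [pv_out_flatMap vals [], List.nil_append]
      rw [show (fun (st : PySem.Set String × List String) v =>
            if PySem.Set.contains st.1 v then st else (PySem.Set.add st.1 v, st.2 ++ [v]))
          = pvStep from rfl]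
      rw [pv_fold_eq_nubGo]
      have hfilter : (vals.flatMap pvPieces).filter
          (fun x => !(PySem.Set.contains PySem.Set.empty x)) = vals.flatMap pvPieces := by
        apply List.filter_eq_self.mpr
        intro a _
        simp [PySem.Set.empty]
      rw [hfilter]
      congr 1
      exact (List.flatMap_congr (fun v _ => pv_pieces_eq v)).symm
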